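-- pv_equiv track=rewrite | github.com/dpearson2699/sports-betting-calculator | scripts/generate_python_badge.py | humanize_specifier
-- ===== SOURCE A (Python) =====
-- def humanize_specifier(spec: str) -> str:
--     parts = [segment.strip() for segment in spec.split(",") if segment.strip()]
--
--     equals = [segment[2:] for segment in parts if segment.startswith("==")]
--     if equals:
--         return equals[0]
--
--     minimums: list[str] = []
--     uppers: list[str] = []
--
--     for segment in parts:
--         if segment.startswith(">="):
--             minimums.append(segment[2:])
--         elif segment.startswith(">"):
--             minimums.append(segment[1:])
--         elif segment.startswith("<=") or segment.startswith("<"):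
--             # Normalise to strip leading comparison characters.
--             uppers.append(segment.lstrip("<="))
--
--     message: str
--     if minimums:
--         # Use the highest lower-bound to be safest.
--         minimums.sort()
--         message = f"{minimums[-1]}+"
--     else:
--         message = spec
--
--     if uppers:
--         uppers.sort()
--         message = f"{message} <{uppers[0]}"
--
--     return message
-- ===== SOURCE B (Python) =====
-- def humanize_specifier(spec: str) -> str:
--     parts = [segment.strip() for segment in spec.split(",") if segment.strip()]
--
--     lo = None   # lexicographically largest lower bound seen so far
--     up = None   # lexicographically smallest upper bound seen so far
--     for seg in parts:
--         if seg.startswith("=="):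
--             return seg[2:]
--         if seg.startswith(">="):
--             v = seg[2:]
--             if lo is None or lo < v:
--                 lo = v
--         elif seg.startswith(">"):
--             v = seg[1:]
--             if lo is None or lo < v:
--                 lo = v
--         elif seg.startswith("<"):
--             v = seg.lstrip("<=")
--             if up is None or v < up:
--                 up = v
--
--     message = f"{lo}+" if lo is not None else spec
--     if up is not None:
--         message = f"{message} <{up}"
--     return message
-- ===== Notes on version B (the rewrite author's own statement) =====
-- stated objective: simpler
-- what changed: Replaced A's build-two-lists-then-sort-and-index approach (plus a separate pre-pass over parts for equality pins) by a single pass over the segments that returns at the first equality pin and otherwise keeps only the running lexicographic maximum lower bound and minimum upper bound.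
import Mathlib
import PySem

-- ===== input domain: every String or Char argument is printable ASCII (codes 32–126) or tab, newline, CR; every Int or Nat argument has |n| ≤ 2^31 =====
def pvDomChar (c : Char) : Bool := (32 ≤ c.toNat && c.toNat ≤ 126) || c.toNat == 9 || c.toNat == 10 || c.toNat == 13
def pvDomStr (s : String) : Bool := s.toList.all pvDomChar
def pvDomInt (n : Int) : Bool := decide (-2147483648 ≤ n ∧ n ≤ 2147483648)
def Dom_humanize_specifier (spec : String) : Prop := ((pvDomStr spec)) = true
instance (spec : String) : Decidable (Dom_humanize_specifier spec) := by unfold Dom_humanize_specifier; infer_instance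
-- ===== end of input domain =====

-- B replaces A's build-two-lists-then-sort-and-index approach by a single pass keeping only the
-- running lexicographic max lower bound / min upper bound (objective: simpler; return value only, no side effects).

-- shared primitive ports (both Pythons run these exact built-in calls):
-- parts = [segment.strip() for segment in spec.split(",") if segment.strip()]
def pvParts (spec : String) : List (List Char) :=
  ((PySem.Chars.splitOn spec.toList [',']).map PySem.Chars.strip).filter (fun s => decide (s ≠ []))

-- exact port of s.lstrip("<=") : drop leading chars that are '<' or '='
def pvLstrip (s : List Char) : List Char := s.dropWhile (fun c => c == '<' || c == '=')

-- ===== PORT A =====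
def humanize_specifier (spec : String) : String :=
  let parts := pvParts spec
  let equals := (parts.filter (fun s => PySem.Chars.startswith s ['=', '='])).map
      (fun s => PySem.List.slice s (some 2) none)
  match equals with
  | e :: _ => String.ofList e
  | [] =>
    let mu := parts.foldl (fun (mu : List (List Char) × List (List Char)) seg =>
        if PySem.Chars.startswith seg ['>', '='] then (mu.1 ++ [PySem.List.slice seg (some 2) none], mu.2)
        else if PySem.Chars.startswith seg ['>'] then (mu.1 ++ [PySem.List.slice seg (some 1) none], mu.2)
        else if PySem.Chars.startswith seg ['<', '='] || PySem.Chars.startswith seg ['<'] then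
          (mu.1, mu.2 ++ [pvLstrip seg])
        else mu) ([], [])
    let message := if mu.1 = [] then spec.toList
      else PySem.List.pyGetD (PySem.List.sorted mu.1 (fun x => x) false) (-1) [] ++ ['+']
    let message := if mu.2 = [] then message
      else message ++ (' ' :: '<' :: PySem.List.pyGetD (PySem.List.sorted mu.2 (fun x => x) false) 0 [])
    String.ofList message

-- ===== PORT B =====
-- 'if lo is None or lo < v: lo = v'
def pvMaxO (lo : Option (List Char)) (v : List Char) : Option (List Char) :=
  match lo with
  | none => some v
  | some m => if m < v then some v else some m

-- 'if up is None or v < up: up = v'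
def pvMinO (up : Option (List Char)) (v : List Char) : Option (List Char) :=
  match up with
  | none => some v
  | some u => if v < u then some v else some u

-- the two f-strings after the loop
def pvFinish (spec : String) (lo up : Option (List Char)) : List Char :=
  let message := match lo with
    | some m => m ++ ['+']
    | none => spec.toList
  match up with
  | some u => message ++ (' ' :: '<' :: u)
  | none => message

-- the for-loop with its early return on '=='
def pvAltGo (spec : String) : List (List Char) → Option (List Char) → Option (List Char) → List Char
  | [], lo, up => pvFinish spec lo up
  | seg :: rest, lo, up =>
    if PySem.Chars.startswith seg ['=', '='] then PySem.List.slice seg (some 2) none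
    else if PySem.Chars.startswith seg ['>', '='] then
      pvAltGo spec rest (pvMaxO lo (PySem.List.slice seg (some 2) none)) up
    else if PySem.Chars.startswith seg ['>'] then
      pvAltGo spec rest (pvMaxO lo (PySem.List.slice seg (some 1) none)) up
    else if PySem.Chars.startswith seg ['<'] then
      pvAltGo spec rest lo (pvMinO up (pvLstrip seg))
    else pvAltGo spec rest lo up

def humanize_specifier_alt (spec : String) : String :=
  String.ofList (pvAltGo spec (pvParts spec) none none)

-- ===== PRECONDITION & SPEC =====
def Spec_humanize_specifier (spec : String) (out : String) : Prop := out = humanize_specifier_alt spec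
instance (spec : String) (out : String) : Decidable (Spec_humanize_specifier spec out) := by unfold Spec_humanize_specifier; infer_instance

-- ===== CLAIM (what is proved, stated in full; the proofs are below) =====
def Claim_equal_humanize_specifier : Prop := ∀ (spec : String), Dom_humanize_specifier spec → Spec_humanize_specifier spec (humanize_specifier spec)

-- ===== LEMMAS AND PROOFS =====

-- classification of a segment, as A's elif chain does it (proof-only helpers)
def pvMinKey (seg : List Char) : Option (List Char) :=
  if PySem.Chars.startswith seg ['>', '='] then some (PySem.List.slice seg (some 2) none)
  else if PySem.Chars.startswith seg ['>'] then some (PySem.List.slice seg (some 1) none)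
  else none

def pvUpKey (seg : List Char) : Option (List Char) :=
  if PySem.Chars.startswith seg ['>', '='] then none
  else if PySem.Chars.startswith seg ['>'] then none
  else if PySem.Chars.startswith seg ['<', '='] || PySem.Chars.startswith seg ['<'] then some (pvLstrip seg)
  else none

-- A's loop builds exactly the two filterMap lists
theorem pvFoldPair (parts : List (List Char)) (m u : List (List Char)) :
    parts.foldl (fun (mu : List (List Char) × List (List Char)) seg =>
        if PySem.Chars.startswith seg ['>', '='] then (mu.1 ++ [PySem.List.slice seg (some 2) none], mu.2)
        else if PySem.Chars.startswith seg ['>'] then (mu.1 ++ [PySem.List.slice seg (some 1) none], mu.2)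
        else if PySem.Chars.startswith seg ['<', '='] || PySem.Chars.startswith seg ['<'] then
          (mu.1, mu.2 ++ [pvLstrip seg])
        else mu) (m, u)
      = (m ++ parts.filterMap pvMinKey, u ++ parts.filterMap pvUpKey) := by
  induction parts generalizing m u with
  | nil => simp
  | cons seg rest ih =>
    by_cases h1 : PySem.Chars.startswith seg ['>', '='] = true
    · have hm : pvMinKey seg = some (PySem.List.slice seg (some 2) none) := by simp [pvMinKey, h1]
      have hu : pvUpKey seg = none := by simp [pvUpKey, h1]
      simp only [List.foldl_cons, List.filterMap_cons, hm, hu]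
      rw [if_pos h1, ih]
      simp
    · by_cases h2 : PySem.Chars.startswith seg ['>'] = true
      · have hm : pvMinKey seg = some (PySem.List.slice seg (some 1) none) := by simp [pvMinKey, h1, h2]
        have hu : pvUpKey seg = none := by simp [pvUpKey, h1, h2]
        simp only [List.foldl_cons, List.filterMap_cons, hm, hu]
        rw [if_neg (by simp [h1]), if_pos h2, ih]
        simp
      · by_cases h3 : (PySem.Chars.startswith seg ['<', '='] || PySem.Chars.startswith seg ['<']) = true
        · have hm : pvMinKey seg = none := by simp [pvMinKey, h1, h2]
          have hu : pvUpKey seg = some (pvLstrip seg) := by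
            simp only [pvUpKey, h3]
            simp [h1, h2]
          simp only [List.foldl_cons, List.filterMap_cons, hm, hu]
          rw [if_neg (by simp [h1]), if_neg (by simp [h2]), if_pos h3, ih]
          simp
        · have hm : pvMinKey seg = none := by simp [pvMinKey, h1, h2]
          have hu : pvUpKey seg = none := by simp [pvUpKey, h1, h2, h3]
          simp only [List.foldl_cons, List.filterMap_cons, hm, hu]
          rw [if_neg (by simp [h1]), if_neg (by simp [h2]), if_neg (by simp [h3]), ih]

theorem pvMaxO_some (m v : List Char) : pvMaxO (some m) v = some (max m v) := by
  rcases lt_or_ge m v with h | h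
  · simp [pvMaxO, h, max_eq_right h.le]
  · simp [pvMaxO, not_lt.mpr h, max_eq_left h]

theorem pvMinO_some (u v : List Char) : pvMinO (some u) v = some (min v u) := by
  rcases lt_or_ge v u with h | h
  · simp [pvMinO, h, min_eq_left h.le]
  · simp [pvMinO, not_lt.mpr h, min_eq_right h]

theorem pvFoldMax_some (l : List (List Char)) (m : List Char) :
    l.foldl pvMaxO (some m) = some (l.foldl max m) := by
  induction l generalizing m with
  | nil => rfl
  | cons a t ih => simp [pvMaxO_some, ih]

theorem pvFoldMax_none (l : List (List Char)) :
    l.foldl pvMaxO none = l.max? := by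
  cases l with
  | nil => rfl
  | cons a t => simp [pvMaxO, pvFoldMax_some, List.max?]

theorem pvFoldMin_some (l : List (List Char)) (m : List Char) :
    l.foldl pvMinO (some m) = some (l.foldl min m) := by
  induction l generalizing m with
  | nil => rfl
  | cons a t ih => simp [pvMinO_some, ih, min_comm]

theorem pvFoldMin_none (l : List (List Char)) :
    l.foldl pvMinO none = l.min? := by
  cases l with
  | nil => rfl
  | cons a t => simp [pvMinO, pvFoldMin_some, List.min?]

theorem pvLe_getLast : ∀ (s : List (List Char)), s.Pairwise (· ≤ ·) → ∀ (hne : s ≠ []) (x : List Char), x ∈ s → x ≤ s.getLast hne := by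
  intro s
  induction s with
  | nil => intro _ hne; cases hne rfl
  | cons a t ih =>
    intro h hne x hx
    cases t with
    | nil => simp_all
    | cons b t' =>
      rcases List.mem_cons.mp hx with rfl | hx
      · refine le_trans (List.rel_of_pairwise_cons h (List.mem_cons_self ..)) ?_
        have := ih h.of_cons (by simp) b (List.mem_cons_self ..)
        simpa [List.getLast_cons] using this
      · have := ih h.of_cons (by simp) x hx
        simpa [List.getLast_cons] using this

theorem pvSortedBridge (l : List (List Char)) :
    PySem.List.sorted l (fun x => x) false
      = @PySem.List.sorted (List Char) (List Char) List.instLinearOrder.toLT LinearOrder.toDecidableLT l (fun x => x) false := by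
  have hdec : (fun (a b : List Char) => a.decidableLT b) = (LinearOrder.toDecidableLT (α := List Char)) := by
    funext a b; exact Subsingleton.elim _ _
  exact congrArg (fun inst : DecidableLT (List Char) =>
    @PySem.List.sorted (List Char) (List Char) List.instLT inst l (fun x => x) false) hdec

theorem pvSorted_getLast? (l : List (List Char)) (hne : l ≠ []) :
    (PySem.List.sorted l (fun x => x) false).getLast? = l.max? := by
  have hp := PySem.List.sorted_perm (xs := l) (key := fun x : List Char => x) (rev := false)
  have hs : (PySem.List.sorted l (fun x : List Char => x) false).Pairwise (· ≤ ·) := by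
    rw [pvSortedBridge]
    exact PySem.List.sorted_pairwise (xs := l) (key := fun x : List Char => x)
  have hne' : PySem.List.sorted l (fun x : List Char => x) false ≠ [] := by
    simpa [PySem.List.sorted_eq_nil_iff] using hne
  rw [List.getLast?_eq_some_getLast (h := hne')]
  symm
  rw [List.max?_eq_some_iff]
  exact ⟨hp.mem_iff.mp (List.getLast_mem hne'),
    fun b hb => pvLe_getLast _ hs hne' b (hp.mem_iff.mpr hb)⟩

theorem pvSorted_head? (l : List (List Char)) (hne : l ≠ []) :
    (PySem.List.sorted l (fun x => x) false).head? = l.min? := by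
  have hp := PySem.List.sorted_perm (xs := l) (key := fun x : List Char => x) (rev := false)
  have hs : (PySem.List.sorted l (fun x : List Char => x) false).Pairwise (· ≤ ·) := by
    rw [pvSortedBridge]
    exact PySem.List.sorted_pairwise (xs := l) (key := fun x : List Char => x)
  have hne' : PySem.List.sorted l (fun x : List Char => x) false ≠ [] := by
    simpa [PySem.List.sorted_eq_nil_iff] using hne
  obtain ⟨a, t, hat⟩ := List.exists_cons_of_ne_nil hne'
  rw [hat, List.head?_cons]
  symm
  rw [List.min?_eq_some_iff]
  rw [hat] at hp hs
  constructor
  · exact hp.mem_iff.mp (List.mem_cons_self ..)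
  · intro b hb
    rcases List.mem_cons.mp (hp.mem_iff.mpr hb) with rfl | hbt
    · exact le_refl _
    · exact List.rel_of_pairwise_cons hs hbt

theorem pvGetNeg1 (s : List (List Char)) (hne : s ≠ []) (d : List Char) :
    PySem.List.pyGetD s (-1) d = s.getLast hne := by
  have hlen : 0 < s.length := List.length_pos_of_ne_nil hne
  simp only [PySem.List.pyGetD, PySem.List.pyGet?, PySem.List.pyIdx?]
  norm_num
  rw [if_pos (by omega : 1 ≤ s.length)]
  simp only [Option.bind_some]
  rw [List.getElem?_eq_getElem (by omega)]
  simp [List.getLast_eq_getElem]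

theorem pvGet0 (s : List (List Char)) (hne : s ≠ []) (d : List Char) :
    PySem.List.pyGetD s 0 d = s.head hne := by
  have hlen : 0 < s.length := List.length_pos_of_ne_nil hne
  simp only [PySem.List.pyGetD, PySem.List.pyGet?, PySem.List.pyIdx?]
  norm_num
  rw [if_pos hlen]
  simp only [Option.bind_some]
  rw [List.getElem?_eq_getElem (by omega)]
  simp [List.head_eq_getElem]

-- main loop invariant: B's recursion computes A's answer, for any accumulators
theorem pvLtOfLe (seg : List Char) (h : PySem.Chars.startswith seg ['<', '='] = true) :
    PySem.Chars.startswith seg ['<'] = true := by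
  rw [PySem.Chars.startswith_iff] at h ⊢
  exact List.IsPrefix.trans (by decide) h

theorem pvMain (spec : String) (parts : List (List Char)) (lo up : Option (List Char)) :
    pvAltGo spec parts lo up =
      (match (parts.filter (fun s => PySem.Chars.startswith s ['=', '='])).map
          (fun s => PySem.List.slice s (some 2) none) with
        | e :: _ => e
        | [] => pvFinish spec ((parts.filterMap pvMinKey).foldl pvMaxO lo)
            ((parts.filterMap pvUpKey).foldl pvMinO up)) := by
  induction parts generalizing lo up with
  | nil => simp [pvAltGo]
  | cons seg rest ih =>
    by_cases h0 : PySem.Chars.startswith seg ['=', '='] = true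
    · simp [pvAltGo, h0]
    · by_cases h1 : PySem.Chars.startswith seg ['>', '='] = true
      · have hm : pvMinKey seg = some (PySem.List.slice seg (some 2) none) := by simp [pvMinKey, h1]
        have hu : pvUpKey seg = none := by simp [pvUpKey, h1]
        simp only [pvAltGo, h0, h1, if_true, List.filter_cons, List.filterMap_cons, hm, hu]
        simp only [Bool.false_eq_true, if_false, List.foldl_cons]
        exact ih _ _
      · by_cases h2 : PySem.Chars.startswith seg ['>'] = true
        · have hm : pvMinKey seg = some (PySem.List.slice seg (some 1) none) := by simp [pvMinKey, h1, h2]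
          have hu : pvUpKey seg = none := by simp [pvUpKey, h1, h2]
          simp only [pvAltGo, h0, h1, h2, if_true, List.filter_cons, List.filterMap_cons, hm, hu]
          simp only [Bool.false_eq_true, if_false, List.foldl_cons]
          exact ih _ _
        · by_cases h4 : PySem.Chars.startswith seg ['<'] = true
          · have hm : pvMinKey seg = none := by simp [pvMinKey, h1, h2]
            have hu : pvUpKey seg = some (pvLstrip seg) := by simp [pvUpKey, h1, h2, h4]
            simp only [pvAltGo, h0, h1, h2, h4, if_true, List.filter_cons, List.filterMap_cons, hm, hu]
            simp only [Bool.false_eq_true, if_false, List.foldl_cons]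
            exact ih _ _
          · have h3 : PySem.Chars.startswith seg ['<', '='] = false := by
              by_contra hc
              exact h4 (pvLtOfLe seg (by simpa using hc))
            have hm : pvMinKey seg = none := by simp [pvMinKey, h1, h2]
            have hu : pvUpKey seg = none := by simp [pvUpKey, h1, h2, h3, h4]
            simp only [pvAltGo, h0, h1, h2, h4, List.filter_cons, List.filterMap_cons, hm, hu]
            simp only [Bool.false_eq_true, if_false]
            exact ih _ _

theorem pvCombine (spec : String) (mins ups : List (List Char)) :
    (if ups = []
     then (if mins = [] then spec.toList
       else PySem.List.pyGetD (PySem.List.sorted mins (fun x => x) false) (-1) [] ++ ['+'])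
     else (if mins = [] then spec.toList
       else PySem.List.pyGetD (PySem.List.sorted mins (fun x => x) false) (-1) [] ++ ['+'])
       ++ ' ' :: '<' :: PySem.List.pyGetD (PySem.List.sorted ups (fun x => x) false) 0 [])
    = pvFinish spec (mins.foldl pvMaxO none) (ups.foldl pvMinO none) := by
  have hmsg : (if mins = [] then spec.toList
      else PySem.List.pyGetD (PySem.List.sorted mins (fun x => x) false) (-1) [] ++ ['+'])
      = (match mins.foldl pvMaxO none with
         | some m => m ++ ['+']
         | none => spec.toList) := by
    by_cases hm : mins = []
    · subst hm; simp
    · rw [if_neg hm]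
      obtain ⟨M, hM⟩ : ∃ M, mins.foldl pvMaxO none = some M := by
        cases mins with
        | nil => cases hm rfl
        | cons a t => exact ⟨List.foldl max a t, by simpa [pvMaxO] using pvFoldMax_some t a⟩
      rw [hM]
      have hsne : PySem.List.sorted mins (fun x : List Char => x) false ≠ [] := by
        simpa [PySem.List.sorted_eq_nil_iff] using hm
      rw [pvGetNeg1 _ hsne]
      congr 1
      have hlast := pvSorted_getLast? mins hm
      rw [List.getLast?_eq_some_getLast (h := hsne), ← pvFoldMax_none, hM] at hlast
      exact Option.some.inj hlast
  by_cases hu : ups = []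
  · subst hu
    rw [if_pos rfl, hmsg]
    cases mins.foldl pvMaxO none <;> simp [pvFinish]
  · rw [if_neg hu, hmsg]
    obtain ⟨U, hU⟩ : ∃ U, ups.foldl pvMinO none = some U := by
      cases ups with
      | nil => cases hu rfl
      | cons a t => exact ⟨List.foldl min a t, by simpa [pvMinO] using pvFoldMin_some t a⟩
    rw [hU]
    have hsne : PySem.List.sorted ups (fun x : List Char => x) false ≠ [] := by
      simpa [PySem.List.sorted_eq_nil_iff] using hu
    rw [pvGet0 _ hsne]
    have hhead := pvSorted_head? ups hu
    rw [List.head?_eq_some_head (h := hsne), ← pvFoldMin_none, hU] at hhead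
    rw [Option.some.inj hhead]
    cases mins.foldl pvMaxO none <;> simp [pvFinish]

theorem humanize_specifier_eq (spec : String) :
    humanize_specifier spec = humanize_specifier_alt spec := by
  have hfold := pvFoldPair (pvParts spec) [] []
  simp only [List.nil_append] at hfold
  unfold humanize_specifier humanize_specifier_alt
  rw [pvMain]
  simp only [hfold]
  cases hEq : ((pvParts spec).filter (fun s => PySem.Chars.startswith s ['=', '='])).map
      (fun s => PySem.List.slice s (some 2) none) with
  | cons e t => rfl
  | nil =>
    exact congrArg String.ofList (pvCombine spec _ _)

-- ===== VERDICT (by name: the statement is the Claim_ definition above) =====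
theorem humanize_specifier_spec : Claim_equal_humanize_specifier := by
  intro spec _
  unfold Spec_humanize_specifier
  exact humanize_specifier_eq spec
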